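-- pv_equiv track=rewrite | github.com/Akila-Wasalathilaka/Slum-detection-model-using-UNET | SlumSeg/scripts/analyze_dataset.py | extract_regions
-- ===== SOURCE A (Python) =====
-- def extract_regions(image_ids: list) -> dict:
--     """Extract region information from image IDs."""
--     regions = {}
--     for img_id in image_ids:
--         # Extract region from filename (e.g., jp22_1.0_1 -> jp22)
--         parts = img_id.split('_')
--         if len(parts) >= 1:
--             region = parts[0]
--             if region not in regions:
--                 regions[region] = 0
--             regions[region] += 1
--     return regions
-- ===== SOURCE B (Python) =====
-- def extract_regions(image_ids: list) -> dict:
--     """Extract region information from image IDs."""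
--     prefixes = [img_id.split('_')[0] for img_id in image_ids]
--     # Partition loop: repeatedly take the first remaining prefix, count it by
--     # removing all its occurrences (length difference), continue on what is left.
--     result = {}
--     remaining = prefixes
--     while remaining:
--         region = remaining[0]
--         rest = [p for p in remaining if p != region]
--         result[region] = len(remaining) - len(rest)
--         remaining = rest
--     return result
-- ===== Notes on version B (the rewrite author's own statement) =====
-- stated objective: alternative
-- what changed: Replaces A's single-pass running-counter dict with a partition loop: repeatedly take the first remaining prefix, remove all its occurrences so its count is the length difference, and continue on the remainder; no counter is ever maintained.
import Mathlib
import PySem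

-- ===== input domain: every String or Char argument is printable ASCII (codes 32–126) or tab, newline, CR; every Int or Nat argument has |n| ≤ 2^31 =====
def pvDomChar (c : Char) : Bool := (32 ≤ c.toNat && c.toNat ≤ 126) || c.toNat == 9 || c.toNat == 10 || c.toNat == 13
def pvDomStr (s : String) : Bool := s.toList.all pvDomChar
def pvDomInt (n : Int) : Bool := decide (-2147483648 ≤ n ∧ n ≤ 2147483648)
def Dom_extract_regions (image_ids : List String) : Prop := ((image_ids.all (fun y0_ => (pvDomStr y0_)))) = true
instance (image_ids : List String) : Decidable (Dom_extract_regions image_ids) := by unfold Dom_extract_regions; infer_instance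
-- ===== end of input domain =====

-- B replaces A's single-pass running-counter dict by a partition loop: take the first
-- remaining prefix, remove all its occurrences (the count is the length difference), repeat on the rest.

-- ===== PORT A =====
def extract_regions (image_ids : List String) : List (String × Int) :=
  (image_ids.foldl (fun regions img_id =>
    let parts := (PySem.Str.split? img_id "_").getD []   -- sep "_" is nonempty, so split? is always some
    if parts.length ≥ 1 then
      let region := parts.headD ""                        -- parts[0]; in range because length ≥ 1
      let regions := if PySem.Dict.contains regions region = false
                     then PySem.Dict.insert regions region 0 else regions
      PySem.Dict.insert regions region (PySem.Dict.getD regions region 0 + 1)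
    else regions) PySem.Dict.empty).items

-- ===== PORT B =====
-- The while-loop of Source B: 'result' accumulates; each turn takes the first remaining
-- prefix, removes all its occurrences, and records the length difference as its count.
-- result[region] = n is an append, since 'region' was removed from 'remaining' before
-- ever recurring, so it is always a fresh key.
def pvBuild (remaining : List String) (result : List (String × Int)) : List (String × Int) :=
  match remaining with
  | [] => result
  | r :: t =>
      let rest := List.filter (fun p => p != r) (r :: t)
      pvBuild rest (result ++ [(r, ((r :: t).length : Int) - (rest.length : Int))])
termination_by remaining.length
decreasing_by
  simp only [List.filter_cons, bne_self_eq_false, Bool.false_eq_true, if_false, List.length_cons]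
  exact Nat.lt_succ_of_le (List.length_filter_le _ _)

def extract_regions_alt (image_ids : List String) : List (String × Int) :=
  let prefixes := image_ids.map (fun img_id => ((PySem.Str.split? img_id "_").getD []).headD "")
  pvBuild prefixes []

-- ===== PRECONDITION & SPEC =====
def Spec_extract_regions (image_ids : List String) (out : List (String × Int)) : Prop := out = extract_regions_alt image_ids
instance (image_ids : List String) (out : List (String × Int)) : Decidable (Spec_extract_regions image_ids out) := by unfold Spec_extract_regions; infer_instance

-- ===== CLAIM (what is proved, stated in full; the proofs are below) =====
def Claim_equal_extract_regions : Prop := ∀ (image_ids : List String), Dom_extract_regions image_ids → Spec_extract_regions image_ids (extract_regions image_ids)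

-- ===== LEMMAS AND PROOFS =====

theorem pv_go_ne_nil (sep : List Char) : ∀ (fuel : Nat) (l cur : List Char) (acc : List (List Char)),
    PySem.Chars.splitOn.go sep fuel l cur acc ≠ [] := by
  intro fuel
  induction fuel with
  | zero => intro l cur acc; simp [PySem.Chars.splitOn.go]
  | succ n ih =>
    intro l cur acc
    cases l with
    | nil => simp [PySem.Chars.splitOn.go]
    | cons c rest =>
      rw [PySem.Chars.splitOn.go]
      split_ifs with h
      · exact ih _ _ _
      · exact ih _ _ _

theorem pv_splitOn_ne_nil (s sep : List Char) : PySem.Chars.splitOn s sep ≠ [] := by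
  unfold PySem.Chars.splitOn; exact pv_go_ne_nil _ _ _ _ _

theorem pv_parts_ne_nil (s : String) : (PySem.Str.split? s "_").getD [] ≠ [] := by
  have h := PySem.Str.split?_map s "_"
  cases hs : PySem.Str.split? s "_" with
  | none => rw [hs] at h; simp [PySem.Chars.split?] at h
  | some l =>
    rw [hs] at h
    simp only [Option.map_some] at h
    intro hl
    subst hl
    simp [PySem.Chars.split?] at h
    exact pv_splitOn_ne_nil _ _ h

-- a Dict with equal item lists is equal
theorem pv_dict_eq_of_items {κ ν : Type} (a b : PySem.Dict κ ν) (h : a.items = b.items) : a = b := by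
  cases a; cases b; simpa [PySem.Dict.items] using h

-- inserting 0 then overwriting with 1 at a fresh key is inserting 1
theorem pv_insert_zero_insert_one (d : PySem.Dict String Int) (k : String)
    (h : d.contains k = false) :
    (d.insert k 0).insert k 1 = d.insert k 1 := by
  apply pv_dict_eq_of_items
  rw [PySem.Dict.items_insert_of_contains _ _ (by simp),
      PySem.Dict.items_insert_of_not_contains _ _ h,
      PySem.Dict.items_insert_of_not_contains _ _ h]
  have hk : ∀ p ∈ d.items, p.1 ≠ k := by
    intro p hp hpk
    have := PySem.Dict.mem_keys_of_mem_items d hp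
    rw [hpk] at this
    rw [← PySem.Dict.contains_iff_mem_keys] at this
    simp [h] at this
  rw [List.map_append]
  congr 1
  · have : List.map (fun p => if (p.1 == k) = true then ((k : String), (1 : Int)) else p) d.items
        = List.map id d.items := List.map_congr_left (by intro p hp; simp [hk p hp])
    simpa using this
  · simp

-- A's per-element step is the plain counter step on the prefix
theorem pv_stepA_eq (d : PySem.Dict String Int) (s : String) :
    (let parts := (PySem.Str.split? s "_").getD []
     if parts.length ≥ 1 then
       let region := parts.headD ""
       let d' := if PySem.Dict.contains d region = false
                 then PySem.Dict.insert d region 0 else d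
       PySem.Dict.insert d' region (PySem.Dict.getD d' region 0 + 1)
     else d)
    = PySem.Dict.insert d (((PySem.Str.split? s "_").getD []).headD "")
        (PySem.Dict.getD d (((PySem.Str.split? s "_").getD []).headD "") 0 + 1) := by
  have hne := pv_parts_ne_nil s
  have hlen : ((PySem.Str.split? s "_").getD []).length ≥ 1 := by
    cases hl : (PySem.Str.split? s "_").getD [] with
    | nil => exact absurd hl hne
    | cons a t => simp
  simp only [hlen, if_pos]
  set r := ((PySem.Str.split? s "_").getD []).headD "" with hr
  by_cases hc : PySem.Dict.contains d r = false
  · simp only [hc, if_pos]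
    rw [PySem.Dict.getD_insert_self, PySem.Dict.getD_of_not_contains _ _ hc]
    exact pv_insert_zero_insert_one d r hc
  · simp [hc]

-- adding elements already present (r) does not change a Set fold
theorem pv_foldl_add_filter (r : String) :
    ∀ (t : List String) (s : PySem.Set String), s.contains r = true →
    List.foldl PySem.Set.add s t = List.foldl PySem.Set.add s (t.filter (fun p => p != r)) := by
  intro t
  induction t with
  | nil => intro s _; rfl
  | cons x xs ih =>
    intro s hs
    by_cases hx : x = r
    · subst hx
      simp only [List.filter_cons, bne_self_eq_false, Bool.false_eq_true, if_false, List.foldl_cons]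
      rw [show PySem.Set.add s x = s by simp only [PySem.Set.add, hs, if_pos]]
      exact ih s hs
    · simp only [List.filter_cons, show (x != r) = true by simp [hx], if_pos, List.foldl_cons]
      apply ih
      unfold PySem.Set.add
      split_ifs with h
      · exact hs
      · simp [PySem.Set.contains] at hs ⊢
        exact Or.inl hs

-- a head absent from the rest of the fold stays a head
theorem pv_foldl_add_cons (a : String) :
    ∀ (t : List String) (s : List String), (∀ x ∈ t, x ≠ a) →
    List.foldl PySem.Set.add (a :: s) t = a :: List.foldl PySem.Set.add s t := by
  intro t
  induction t with
  | nil => intro s _; rfl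
  | cons x xs ih =>
    intro s hx
    have hxa : x ≠ a := hx x (by simp)
    simp only [List.foldl_cons]
    have : PySem.Set.add (a :: s) x = a :: PySem.Set.add s x := by
      simp [PySem.Set.add, PySem.Set.contains, hxa]
      split_ifs with h <;> simp
    rw [this]
    exact ih _ (fun y hy => hx y (by simp [hy]))

-- ofList over a cons: head, then the dedup of the rest with the head removed
theorem pv_ofList_cons (r : String) (t : List String) :
    PySem.Set.ofList (r :: t) = r :: PySem.Set.ofList (t.filter (fun p => p != r)) := by
  unfold PySem.Set.ofList
  simp only [List.foldl_cons]
  have he : PySem.Set.add PySem.Set.empty r = [r] := by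
    simp [PySem.Set.add, PySem.Set.empty, PySem.Set.contains]
  rw [he, pv_foldl_add_filter r t [r] (by simp [PySem.Set.contains])]
  exact pv_foldl_add_cons r _ [] (by
    intro x hx
    have := List.of_mem_filter hx
    simpa using this)

-- pvBuild computes the first-occurrence distinct prefixes with their counts
theorem pv_build_eq : ∀ (ps : List String) (acc : List (String × Int)),
    pvBuild ps acc = acc ++ (PySem.Set.ofList ps).map (fun k => (k, (ps.count k : Int))) := by
  intro ps acc
  induction ps, acc using pvBuild.induct with
  | case1 acc => simp [pvBuild, PySem.Set.ofList, PySem.Set.empty]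
  | case2 acc r t rest ih =>
    have hrest : rest = t.filter (fun p => p != r) := by
      simp [rest]
    rw [pvBuild, pv_ofList_cons, List.map_cons]
    simp only [List.filter_cons, bne_self_eq_false, Bool.false_eq_true, if_false]
    rw [hrest] at ih
    have hsplit : (t.filter (fun p => p != r)).length + List.count r t = t.length := by
      have h := List.length_eq_countP_add_countP (p := fun p => p != r) (l := t)
      have h1 : t.countP (fun p => p != r) = (t.filter (fun p => p != r)).length :=
        List.countP_eq_length_filter
      have h2 : List.countP (fun a => decide (¬(a != r) = true)) t = List.count r t := by
        unfold List.count
        apply List.countP_congr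
        intro x _
        simp
      omega
    rw [ih]
    rw [List.append_assoc]
    congr 1
    rw [List.singleton_append]
    congr 1
    · rw [Prod.mk.injEq]
      refine ⟨rfl, ?_⟩
      simp only [List.length_cons, List.count_cons, BEq.rfl, if_pos]
      push_cast
      omega
    · apply List.map_congr_left
      intro k hk
      have hkmem : k ∈ t.filter (fun p => p != r) := by
        rw [← PySem.Set.mem_ofList]
        exact hk
      have hkr : k ≠ r := by
        have := List.of_mem_filter hkmem
        simpa using this
      have h1 : List.count k (t.filter (fun p => p != r)) = List.count k t := by
        rw [List.count_filter]
        simp [hkr]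
      have h2 : List.count k (r :: t) = List.count k t := by
        simp [Ne.symm hkr]
      rw [h1, h2]

-- ===== VERDICT (by name: the statement is the Claim_ definition above) =====
theorem extract_regions_spec : Claim_equal_extract_regions := by
  intro ids _
  unfold Spec_extract_regions extract_regions extract_regions_alt
  rw [PySem.List.foldl_congr_mem ids _
        (fun d s => PySem.Dict.insert d (((PySem.Str.split? s "_").getD []).headD "")
          (PySem.Dict.getD d (((PySem.Str.split? s "_").getD []).headD "") 0 + 1))
        PySem.Dict.empty (fun d s _ => pv_stepA_eq d s)]
  have e2 : List.foldl (fun d s => PySem.Dict.insert d (((PySem.Str.split? s "_").getD []).headD "")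
          (PySem.Dict.getD d (((PySem.Str.split? s "_").getD []).headD "") 0 + 1)) PySem.Dict.empty ids
      = List.foldl (fun (d : PySem.Dict String Int) x => d.insert x (d.getD x 0 + 1)) PySem.Dict.empty
          (ids.map (fun s => ((PySem.Str.split? s "_").getD []).headD "")) :=
    (List.foldl_map (f := fun s => ((PySem.Str.split? s "_").getD []).headD "")
      (g := fun (d : PySem.Dict String Int) x => d.insert x (d.getD x 0 + 1))
      (l := ids) (init := PySem.Dict.empty)).symm
  rw [e2, PySem.Dict.foldl_insert_getD_add_one_eq_counter, PySem.Dict.items_counter]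
  rw [pv_build_eq]
  simp
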